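-- pv_equiv track=rewrite | github.com/Flamesword33/python-projects | 2023/critical_rolls_proof.py | roll_dc_with_crit
-- ===== SOURCE A (Python) =====
-- def roll_dc_with_crit(dc):
--     damage = 0
--     for roll in range(1,20):
--         if roll == 1:
--             damage = damage + 28
--         elif roll < dc:
--             damage = damage + 14
--         elif roll >= dc:
--             damage = damage + 7
--     return damage
-- ===== SOURCE B (Python) =====
-- def roll_dc_with_crit(dc):
--     # closed form: roll 1 always crits (+28); of rolls 2..19, `low` are below dc (+14 each),
--     # the rest (18-low) are at/above dc (+7 each); 28 + 14*low + 7*(18-low) = 154 + 7*low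
--     low = max(0, min(18, dc - 2))
--     return 154 + 7 * low
-- ===== Notes on version B (the rewrite author's own statement) =====
-- stated objective: simpler
-- what changed: Replaces the 19-iteration loop over dice rolls by a closed-form clamp count: low = clamp(dc-2, 0, 18) rolls deal 14, the rest 7, giving 154 + 7*low.
import Mathlib
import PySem

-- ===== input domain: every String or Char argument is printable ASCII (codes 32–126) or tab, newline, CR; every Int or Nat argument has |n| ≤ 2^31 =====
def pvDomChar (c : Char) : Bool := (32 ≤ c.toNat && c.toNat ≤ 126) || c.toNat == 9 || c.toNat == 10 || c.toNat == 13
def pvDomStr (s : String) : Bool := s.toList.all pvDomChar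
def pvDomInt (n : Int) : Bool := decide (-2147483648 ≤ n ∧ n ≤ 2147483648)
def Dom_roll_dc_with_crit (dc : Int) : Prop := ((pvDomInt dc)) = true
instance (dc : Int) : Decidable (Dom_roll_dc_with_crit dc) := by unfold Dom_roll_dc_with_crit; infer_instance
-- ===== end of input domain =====

-- B replaces A's 19-iteration loop by a closed-form clamp formula (objective: simpler).

-- ===== PORT A =====
def roll_dc_with_crit (dc : Int) : Int :=
  (PySem.List.pyRange 1 20 1).foldl
    (fun damage roll =>
      if roll == 1 then damage + 28
      else if roll < dc then damage + 14
      else if roll ≥ dc then damage + 7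
      else damage)
    0

-- ===== PORT B =====
def roll_dc_with_crit_alt (dc : Int) : Int :=
  154 + 7 * (max 0 (min 18 (dc - 2)))

-- ===== PRECONDITION & SPEC =====
def Spec_roll_dc_with_crit (dc : Int) (out : Int) : Prop := out = roll_dc_with_crit_alt dc
instance (dc : Int) (out : Int) : Decidable (Spec_roll_dc_with_crit dc out) := by unfold Spec_roll_dc_with_crit; infer_instance

-- ===== CLAIM (what is proved, stated in full; the proofs are below) =====
def Claim_equal_roll_dc_with_crit : Prop := ∀ (dc : Int), Dom_roll_dc_with_crit dc → Spec_roll_dc_with_crit dc (roll_dc_with_crit dc)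

-- ===== LEMMAS AND PROOFS =====
-- A's result only depends on dc through its clamp into [2,20]
theorem rollA_clamp (dc : Int) :
    roll_dc_with_crit dc = roll_dc_with_crit (max 2 (min 20 dc)) := by
  unfold roll_dc_with_crit
  apply PySem.List.foldl_congr_mem
  intro acc x hx
  have hb : 1 ≤ x ∧ x ≤ 19 := by
    have : PySem.List.pyRange 1 20 1 = [1,2,3,4,5,6,7,8,9,10,11,12,13,14,15,16,17,18,19] := by decide
    rw [this] at hx
    fin_cases hx <;> omega
  by_cases h1 : x = 1
  · simp [h1]
  · have hxx : (x == 1) = false := by simp [h1]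
    simp only [hxx, Bool.false_eq_true, if_false]
    split_ifs <;> omega

theorem rollA_closed (c : Int) (h2 : 2 ≤ c) (h20 : c ≤ 20) :
    roll_dc_with_crit c = 154 + 7 * (c - 2) := by
  interval_cases c <;> decide

-- ===== VERDICT (by name: the statement is the Claim_ definition above) =====
theorem roll_dc_with_crit_spec : Claim_equal_roll_dc_with_crit := by
  intro dc _
  unfold Spec_roll_dc_with_crit roll_dc_with_crit_alt
  rw [rollA_clamp, rollA_closed (max 2 (min 20 dc)) (by omega) (by omega)]
  omega
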